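-- pv_equiv track=rewrite | github.com/InSmartGroup/GoIT_Python_Course | CORE/Module_3/ex_6_three_in_a_row.py | three_in_a_row
-- ===== SOURCE A (Python) =====
-- def three_in_a_row(words: str):
--     """
--     The function returns True if there are 3 or more lateral items in a row
--     :param words: A message, separated by whitespace
--     :type words: str
--     :return: True, if there are 3 or more str() items in a row, otherwise, returns False
--     :rtype: bool
--     """
--     words_list = words.split()
--     words_counter = 0
--
--     for item in words_list:
--         if item.isalpha():
--             words_counter += 1
--
--             if words_counter >= 3:
--                 return True
--
--         elif item.isdigit():
--             words_counter = 0
--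
--     if words_counter < 3:
--         return False
-- ===== SOURCE B (Python) =====
-- def three_in_a_row(words: str):
--     marker = "".join(
--         "a" if t.isalpha() else "." if t.isdigit() else ""
--         for t in words.split()
--     )
--     return "aaa" in marker
-- ===== Notes on version B (the rewrite author's own statement) =====
-- stated objective: simpler
-- what changed: Replaces the stateful counter loop with early return by a stateless map-then-search: each whitespace token becomes one marker character (alpha), one separator character (digit) or nothing, and the answer is a single three-character substring test on the joined marker string.
import Mathlib
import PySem

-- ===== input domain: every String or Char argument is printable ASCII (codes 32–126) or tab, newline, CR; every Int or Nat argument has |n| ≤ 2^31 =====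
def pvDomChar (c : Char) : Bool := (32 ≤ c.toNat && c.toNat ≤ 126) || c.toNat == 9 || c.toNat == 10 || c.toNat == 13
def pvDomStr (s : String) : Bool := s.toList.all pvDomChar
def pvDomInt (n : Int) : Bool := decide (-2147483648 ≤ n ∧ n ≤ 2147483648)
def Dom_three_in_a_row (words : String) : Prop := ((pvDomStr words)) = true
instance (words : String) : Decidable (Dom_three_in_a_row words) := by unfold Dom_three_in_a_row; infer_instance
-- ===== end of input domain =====

-- B replaces A's stateful counter loop (with early return) by a stateless per-token
-- marker string and a single substring test; objective: simpler.

-- ===== PORT A =====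
-- the for-loop over words.split() carrying words_counter; Python's trailing
-- "if words_counter < 3: return False" always fires at loop end (a counter
-- reaching 3 early-returns True inside the loop), so the [] case is false
def loopA : List String → Int → Bool
  | [], _ => false
  | item :: rest, c =>
    if PySem.Str.strIsalpha item then
      (if c + 1 ≥ 3 then true else loopA rest (c + 1))
    else if PySem.Str.strIsdigit item then
      loopA rest 0
    else
      loopA rest c

def three_in_a_row (words : String) : Bool :=
  loopA (PySem.Str.split₀ words) 0

-- ===== PORT B =====
-- the per-token mapping of Source B's generator expression
def markTok (t : String) : String :=
  if PySem.Str.strIsalpha t then "a" else if PySem.Str.strIsdigit t then "." else ""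

def three_in_a_row_alt (words : String) : Bool :=
  PySem.Str.isIn "aaa" (PySem.Str.join "" ((PySem.Str.split₀ words).map markTok))

-- ===== PRECONDITION & SPEC =====
def Spec_three_in_a_row (words : String) (out : Bool) : Prop := out = three_in_a_row_alt words
instance (words : String) (out : Bool) : Decidable (Spec_three_in_a_row words out) := by unfold Spec_three_in_a_row; infer_instance

-- ===== CLAIM (what is proved, stated in full; the proofs are below) =====
def Claim_equal_three_in_a_row : Prop := ∀ (words : String), Dom_three_in_a_row words → Spec_three_in_a_row words (three_in_a_row words)

-- ===== LEMMAS AND PROOFS =====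

-- A's counter loop re-read on the marker characters of B
def runScan : List Char → Int → Bool
  | [], _ => false
  | ch :: rest, c =>
    if ch = 'a' then (if c + 1 ≥ 3 then true else runScan rest (c + 1))
    else runScan rest 0

theorem join_nil_cons (x : List Char) (xs : List (List Char)) :
    PySem.Chars.join [] (x :: xs) = x ++ PySem.Chars.join [] xs := by
  cases xs with
  | nil => simp [PySem.Chars.join, List.intercalate]
  | cons y ys => simp [PySem.Chars.join, List.intercalate, List.intersperse]

def markerOf (tokens : List String) : List Char :=
  PySem.Chars.join [] (tokens.map (fun t => (markTok t).toList))

-- A's loop equals the scan of the marker characters: each token contributes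
-- exactly its marker character ('a' / '.' / nothing)
theorem loopA_eq_runScan (tokens : List String) (c : Int) :
    loopA tokens c = runScan (markerOf tokens) c := by
  induction tokens generalizing c with
  | nil => simp [loopA, markerOf, PySem.Chars.join, List.intercalate, runScan]
  | cons t ts ih =>
    have hM : markerOf (t :: ts) = (markTok t).toList ++ markerOf ts := by
      simp [markerOf, join_nil_cons]
    rw [hM]
    by_cases ha : PySem.Chars.strIsalpha t.toList = true
    · simp [loopA, markTok, ha, runScan, ih]
    · by_cases hd : PySem.Chars.strIsdigit t.toList = true
      · simp [loopA, markTok, ha, hd, runScan, ih]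
      · simp [loopA, markTok, ha, hd, ih]

-- the scan with counter c ∈ {0,1,2} succeeds exactly when "aaa" occurs in
-- (c leading 'a's) ++ m
theorem runScan_iff (m : List Char) (c : Int) (hc : c = 0 ∨ c = 1 ∨ c = 2) :
    runScan m c = true ↔ ∃ j, ['a','a','a'] <+: (List.replicate c.toNat 'a' ++ m).drop j := by
  induction m generalizing c with
  | nil =>
    simp only [runScan, List.append_nil, Bool.false_eq_true, false_iff]
    rintro ⟨j, hj⟩
    have hlen := hj.length_le
    rw [List.length_drop, List.length_replicate] at hlen
    have : c.toNat ≤ 2 := by omega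
    simp at hlen; omega
  | cons ch rest ih =>
    by_cases hch : ch = 'a'
    · subst hch
      by_cases h3 : c + 1 ≥ 3
      · have hc2 : c = 2 := by omega
        subst hc2
        rw [show runScan ('a' :: rest) 2 = true from by simp [runScan]]
        simp only [true_iff]
        exact ⟨0, by simp [show (2:Int).toNat = 2 from rfl, List.replicate_succ]⟩
      · have heq : List.replicate c.toNat 'a' ++ 'a' :: rest
            = List.replicate (c + 1).toNat 'a' ++ rest := by
          rw [show (c + 1).toNat = c.toNat + 1 from by omega, List.replicate_succ']
          simp
        rw [show runScan ('a' :: rest) c = runScan rest (c + 1) from by simp [runScan, h3], heq]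
        exact ih (c + 1) (by omega)
    · rw [show runScan (ch :: rest) c = runScan rest 0 from by simp [runScan, hch]]
      rw [ih 0 (Or.inl rfl)]
      simp only [Int.toNat_zero, List.replicate_zero, List.nil_append]
      have hck : c.toNat ≤ 2 := by omega
      constructor
      · rintro ⟨j, hj⟩
        refine ⟨j + 1 + c.toNat, ?_⟩
        rw [List.drop_append, List.length_replicate, List.drop_replicate,
          show c.toNat - (j + 1 + c.toNat) = 0 from by omega, List.replicate_zero,
          List.nil_append, show j + 1 + c.toNat - c.toNat = j + 1 from by omega,
          List.drop_succ_cons]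
        exact hj
      · rintro ⟨j, hj⟩
        rw [List.drop_append, List.length_replicate, List.drop_replicate] at hj
        by_cases hjc : c.toNat + 1 ≤ j
        · refine ⟨j - c.toNat - 1, ?_⟩
          rwa [show c.toNat - j = 0 from by omega, List.replicate_zero, List.nil_append,
            show j - c.toNat = (j - c.toNat - 1) + 1 from by omega,
            List.drop_succ_cons] at hj
        · exfalso
          -- an occurrence of "aaa" cannot overlap the ≤ 2 leading 'a's followed by ch ≠ 'a'
          rw [show j - c.toNat = 0 from by omega, List.drop_zero] at hj
          obtain ⟨tl, htl⟩ := hj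
          have hk2 : c.toNat - j ≤ 2 := by omega
          interval_cases h : (c.toNat - j) <;>
            simp [List.replicate_succ] at htl <;> exact hch (by tauto)

-- B's substring test, read as an ∃-drop statement on the marker characters
theorem alt_iff (words : String) :
    three_in_a_row_alt words = true ↔
      ∃ j, ['a','a','a'] <+: (markerOf (PySem.Str.split₀ words)).drop j := by
  unfold three_in_a_row_alt markerOf
  rw [show PySem.Str.isIn "aaa" (PySem.Str.join "" ((PySem.Str.split₀ words).map markTok))
      = PySem.Chars.isIn "aaa".toList (PySem.Str.join "" ((PySem.Str.split₀ words).map markTok)).toList from by simp]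
  rw [← PySem.Chars.exists_prefix_drop_iff_isIn]
  simp [List.map_map, Function.comp_def]

-- ===== VERDICT (by name: the statement is the Claim_ definition above) =====
theorem three_in_a_row_spec : Claim_equal_three_in_a_row := by
  intro words _
  unfold Spec_three_in_a_row three_in_a_row
  rw [loopA_eq_runScan, Bool.eq_iff_iff, runScan_iff _ 0 (Or.inl rfl), alt_iff]
  simp
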